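-- pv_equiv track=rewrite | github.com/daveisagit/advent-of-code | src/common/numty.py | extend_polynomial_sequence
-- ===== SOURCE A (Python) =====
-- from itertools import combinations, islice, pairwise, product
--
-- def extend_polynomial_sequence(seq, forward=1, backward=1, degree_limit=50):
--     """Return the sequence extended forward and backwards a number of terms"""
--     differences = [list(seq)]
--     deg = 0
--     while any(x != 0 for x in differences[-1]):
--         deg += 1
--         if deg > degree_limit:
--             raise RuntimeError(f"Exceeded degree limit of {degree_limit}")
--         difference = differences[-1]
--         next_difference = [b - a for a, b in pairwise(difference)]
--         differences.append(next_difference)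
--
--     new_differences = []
--     for idx in range(len(differences) - 1, -1, -1):
--
--         difference_to_extend = differences[idx]
--
--         lower_difference = None
--         if new_differences:
--             lower_difference = new_differences[-1]
--
--         for t in range(-forward, 0):
--             d = 0
--             if lower_difference:
--                 d = lower_difference[t]
--             difference_to_extend += [difference_to_extend[-1] + d]
--
--         for t in range(backward - 1, -1, -1):
--             d = 0
--             if lower_difference:
--                 d = lower_difference[t]
--             difference_to_extend = [difference_to_extend[0] - d] + difference_to_extend
--
--         new_differences.append(difference_to_extend)
--
--     return new_differences[-1]
-- ===== SOURCE B (Python) =====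
-- def extend_polynomial_sequence(seq, forward=1, backward=1, degree_limit=50):
--     """Return the sequence extended forward and backwards a number of terms.
--
--     Builds the same finite-difference table, but instead of extending every
--     full row it only maintains the two edge diagonals (last elements for
--     forward terms, first elements for backward terms)."""
--     rows = [list(seq)]
--     deg = 0
--     while any(x != 0 for x in rows[-1]):
--         deg += 1
--         if deg > degree_limit:
--             raise RuntimeError(f"Exceeded degree limit of {degree_limit}")
--         prev = rows[-1]
--         rows.append([b - a for a, b in zip(prev, prev[1:])])
--
--     front = []
--     if backward > 0:
--         firsts = [r[0] for r in rows]
--         for _ in range(backward):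
--             for lvl in range(len(rows) - 2, -1, -1):
--                 firsts[lvl] = firsts[lvl] - firsts[lvl + 1]
--             front.append(firsts[0])
--         front.reverse()
--
--     back = []
--     if forward > 0:
--         lasts = [r[-1] for r in rows]
--         for _ in range(forward):
--             for lvl in range(len(rows) - 2, -1, -1):
--                 lasts[lvl] = lasts[lvl] + lasts[lvl + 1]
--             back.append(lasts[0])
--
--     return front + list(seq) + back
-- ===== Notes on version B (the rewrite author's own statement) =====
-- stated objective: faster
-- what changed: B builds the same finite-difference table but never extends the full rows: it maintains only the two edge diagonals (last elements for forward terms, first elements for backward terms), updating each diagonal bottom-up per emitted term and assembling front + seq + back, instead of A's per-row append/prepend extension of every row (whose [x]+list prepends copy whole rows).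
import Mathlib
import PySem

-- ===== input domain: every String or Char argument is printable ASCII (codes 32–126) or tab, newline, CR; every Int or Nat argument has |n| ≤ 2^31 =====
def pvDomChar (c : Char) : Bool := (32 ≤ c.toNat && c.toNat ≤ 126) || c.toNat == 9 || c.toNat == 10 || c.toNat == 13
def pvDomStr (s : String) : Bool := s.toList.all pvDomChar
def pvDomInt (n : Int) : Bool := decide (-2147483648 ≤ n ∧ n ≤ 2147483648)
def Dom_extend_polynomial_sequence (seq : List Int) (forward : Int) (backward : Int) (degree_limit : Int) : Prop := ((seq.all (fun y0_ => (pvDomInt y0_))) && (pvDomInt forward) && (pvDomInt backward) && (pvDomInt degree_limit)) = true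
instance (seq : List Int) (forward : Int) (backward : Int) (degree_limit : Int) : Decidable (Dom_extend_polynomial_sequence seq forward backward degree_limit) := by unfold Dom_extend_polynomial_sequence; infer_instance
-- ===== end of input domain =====

-- B replaces A's full-row extension of every difference row by updates of the two edge
-- diagonals only (alternative decomposition, same exact results; equivalence proved on Pre_).

-- ===== PORT A =====
-- [b - a for a, b in pairwise(difference)]
def pvPairwiseDiff (l : List Int) : List Int := (l.zip l.tail).map (fun p => p.2 - p.1)

theorem pvPairwiseDiff_length (l : List Int) : (pvPairwiseDiff l).length = l.length - 1 := by
  simp [pvPairwiseDiff]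

-- the while-loop building `differences`; none = RuntimeError
def pvBuildA (acc : List (List Int)) (cur : List Int) (deg : Int) (degree_limit : Int) :
    Option (List (List Int)) :=
  if cur.any (fun x => x != 0) then
    if deg + 1 > degree_limit then none
    else pvBuildA (acc ++ [pvPairwiseDiff cur]) (pvPairwiseDiff cur) (deg + 1) degree_limit
  else some acc
termination_by cur.length
decreasing_by
  have hne : cur ≠ [] := by
    intro h0; subst h0; simp_all
  have h1 := pvPairwiseDiff_length cur
  have h2 : 0 < cur.length := List.length_pos_iff.mpr hne
  omega

-- d = lower_difference[t] if lower_difference else 0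
def pvDOf (low : Option (List Int)) (t : Int) : Option Int :=
  match low with
  | none => some 0
  | some l => if l.isEmpty then some 0 else PySem.List.pyGet? l t

-- for t in range(-forward, 0): difference_to_extend += [difference_to_extend[-1] + d]
def pvFwdA (ts : List Int) (low : Option (List Int)) (row : List Int) : Option (List Int) :=
  match ts with
  | [] => some row
  | t :: rest =>
    match pvDOf low t, PySem.List.pyGet? row (-1) with
    | some d, some last => pvFwdA rest low (row ++ [last + d])
    | _, _ => none

-- for t in range(backward - 1, -1, -1): difference_to_extend = [difference_to_extend[0] - d] + ...
def pvBwdA (ts : List Int) (low : Option (List Int)) (row : List Int) : Option (List Int) :=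
  match ts with
  | [] => some row
  | t :: rest =>
    match pvDOf low t, PySem.List.pyGet? row 0 with
    | some d, some first => pvBwdA rest low ((first - d) :: row)
    | _, _ => none

def pvExtRowA (row : List Int) (low : Option (List Int)) (f b : Int) : Option (List Int) :=
  match pvFwdA (PySem.List.pyRange (-f) 0 1) low row with
  | none => none
  | some r1 => pvBwdA (PySem.List.pyRange (b - 1) (-1) (-1)) low r1

-- for idx in range(len(differences)-1, -1, -1): ... new_differences.append(...)
def pvExtAllA (L : List (List Int)) (acc : List (List Int)) (f b : Int) :
    Option (List (List Int)) :=
  match L with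
  | [] => some acc
  | row :: rest =>
    match pvExtRowA row acc.getLast? f b with
    | none => none
    | some row' => pvExtAllA rest (acc ++ [row']) f b

def extend_polynomial_sequence (seq : List Int) (forward : Int) (backward : Int)
    (degree_limit : Int) : List Int :=
  (match pvBuildA [seq] seq 0 degree_limit with
   | none => none
   | some diffs =>
     match pvExtAllA diffs.reverse [] forward backward with
     | none => none
     | some nd => PySem.List.pyGet? nd (-1)).getD []

-- ===== PORT B =====
-- [b - a for a, b in zip(prev, prev[1:])]
def pvDiffB (l : List Int) : List Int := (l.zip (l.drop 1)).map (fun p => p.2 - p.1)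

theorem pvDiffB_length (l : List Int) : (pvDiffB l).length = l.length - 1 := by
  simp [pvDiffB]

def pvBuildB (rows : List (List Int)) (cur : List Int) (deg : Int) (degree_limit : Int) :
    Option (List (List Int)) :=
  if cur.any (fun x => x != 0) then
    if deg + 1 > degree_limit then none
    else pvBuildB (rows ++ [pvDiffB cur]) (pvDiffB cur) (deg + 1) degree_limit
  else some rows
termination_by cur.length
decreasing_by
  have hne : cur ≠ [] := by
    intro h0; subst h0; simp_all
  have h1 := pvDiffB_length cur
  have h2 : 0 < cur.length := List.length_pos_iff.mpr hne
  omega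

-- for lvl in range(len(rows)-2, -1, -1): lasts[lvl] = lasts[lvl] + lasts[lvl+1]
def pvStepF : List Int → List Int
  | [] => []
  | x :: rest =>
    let r := pvStepF rest
    (x + r.headD 0) :: r

-- for lvl in range(len(rows)-2, -1, -1): firsts[lvl] = firsts[lvl] - firsts[lvl+1]
def pvStepB : List Int → List Int
  | [] => []
  | x :: rest =>
    let r := pvStepB rest
    (x - r.headD 0) :: r

-- for _ in range(n): update diagonal; emit its top element
def pvRunF : Nat → List Int → List Int
  | 0, _ => []
  | n + 1, d =>
    let d' := pvStepF d
    d'.headD 0 :: pvRunF n d'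

def pvRunB : Nat → List Int → List Int
  | 0, _ => []
  | n + 1, d =>
    let d' := pvStepB d
    d'.headD 0 :: pvRunB n d'

def extend_polynomial_sequence_alt (seq : List Int) (forward : Int) (backward : Int)
    (degree_limit : Int) : List Int :=
  (match pvBuildB [seq] seq 0 degree_limit with
   | none => none
   | some rows =>
     match (if backward > 0 then
              (rows.mapM (fun r => PySem.List.pyGet? r 0)).map
                (fun firsts => (pvRunB backward.toNat firsts).reverse)
            else some []) with
     | none => none
     | some front =>
       match (if forward > 0 then
                (rows.mapM (fun r => PySem.List.pyGet? r (-1))).map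
                  (fun lasts => pvRunF forward.toNat lasts)
              else some []) with
       | none => none
       | some back => some (front ++ seq ++ back)).getD []

-- ===== PRECONDITION & SPEC =====
-- the k-th finite-difference row of a sequence
def pvDiffIter : Nat → List Int → List Int
  | 0, l => l
  | k + 1, l => pvDiffIter k (pvPairwiseDiff l)

-- Pre_ excludes exactly the inputs where the Python raises: RuntimeError when no difference
-- row of index allowed by degree_limit is identically zero, and IndexError when no NONEMPTY
-- difference row is identically zero (the table bottoms out in the empty row) while an
-- extension is requested (forward > 0 or backward > 0).
def Pre_extend_polynomial_sequence (seq : List Int) (forward : Int) (backward : Int)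
    (degree_limit : Int) : Prop :=
  (∃ k, k < seq.length + 1 ∧ (k = 0 ∨ (k : Int) ≤ degree_limit) ∧
     (pvDiffIter k seq).all (fun x => x == 0) = true) ∧
  ((seq ≠ [] ∧ (pvDiffIter (seq.length - 1) seq).all (fun x => x == 0) = true) ∨
   (forward ≤ 0 ∧ backward ≤ 0))

instance (seq : List Int) (forward : Int) (backward : Int) (degree_limit : Int) :
    Decidable (Pre_extend_polynomial_sequence seq forward backward degree_limit) := by
  unfold Pre_extend_polynomial_sequence; infer_instance

def pvWitness_extend_polynomial_sequence : List Int × Int × Int × Int := ([1, 2, 3], 2, 2, 50)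

def Spec_extend_polynomial_sequence (seq : List Int) (forward : Int) (backward : Int) (degree_limit : Int) (out : List Int) : Prop := out = extend_polynomial_sequence_alt seq forward backward degree_limit
instance (seq : List Int) (forward : Int) (backward : Int) (degree_limit : Int) (out : List Int) : Decidable (Spec_extend_polynomial_sequence seq forward backward degree_limit out) := by unfold Spec_extend_polynomial_sequence; infer_instance

-- ===== CLAIM (what is proved, stated in full; the proofs are below) =====
def Claim_equal_extend_polynomial_sequence : Prop := ∀ (seq : List Int) (forward : Int) (backward : Int) (degree_limit : Int), Dom_extend_polynomial_sequence seq forward backward degree_limit → Pre_extend_polynomial_sequence seq forward backward degree_limit → Spec_extend_polynomial_sequence seq forward backward degree_limit (extend_polynomial_sequence seq forward backward degree_limit)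

-- ===== LEMMAS AND PROOFS =====

-- the difference table as a pure list of rows
def pvDeg (l : List Int) : Nat :=
  if l.any (fun x => x != 0) then pvDeg (pvPairwiseDiff l) + 1 else 0
termination_by l.length
decreasing_by
  have hne : l ≠ [] := by
    intro h0; subst h0; simp_all
  have h1 := pvPairwiseDiff_length l
  have h2 : 0 < l.length := List.length_pos_iff.mpr hne
  omega

theorem pvZero_diff (l : List Int) (h : l.all (fun x => x == 0) = true) :
    (pvPairwiseDiff l).all (fun x => x == 0) = true := by
  simp only [List.all_eq_true, beq_iff_eq] at h ⊢
  intro x hx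
  simp only [pvPairwiseDiff, List.mem_map] at hx
  obtain ⟨p, hp, rfl⟩ := hx
  obtain ⟨hp1, hp2⟩ := List.of_mem_zip (by exact hp)
  have h1 := h p.1 hp1
  have h2 := h p.2 (List.mem_of_mem_tail hp2)
  omega

theorem pvDiffIter_zero (k : Nat) (l : List Int) (h : l.all (fun x => x == 0) = true) :
    (pvDiffIter k l).all (fun x => x == 0) = true := by
  induction k generalizing l with
  | zero => exact h
  | succ k ih => exact ih _ (pvZero_diff l h)

theorem pvAny_eq_false_iff (l : List Int) :
    l.any (fun x => x != 0) = false ↔ l.all (fun x => x == 0) = true := by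
  simp [List.all_eq_true]

theorem pvDeg_le_iff (k : Nat) (l : List Int) :
    (pvDiffIter k l).all (fun x => x == 0) = true ↔ pvDeg l ≤ k := by
  induction k generalizing l with
  | zero =>
    constructor
    · intro h
      rw [pvDeg, if_neg (by rw [Bool.not_eq_true, pvAny_eq_false_iff]; exact h)]
    · intro h
      by_cases hany : l.any (fun x => x != 0) = true
      · rw [pvDeg, if_pos hany] at h; omega
      · exact (pvAny_eq_false_iff l).mp (Bool.not_eq_true _ ▸ hany)
  | succ k ih =>
    by_cases hany : l.any (fun x => x != 0) = true
    · have hdeg : pvDeg l = pvDeg (pvPairwiseDiff l) + 1 := by rw [pvDeg, if_pos hany]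
      constructor
      · intro h
        have := (ih (pvPairwiseDiff l)).mp h
        omega
      · intro h
        exact (ih (pvPairwiseDiff l)).mpr (by omega)
    · have hz : l.all (fun x => x == 0) = true :=
        (pvAny_eq_false_iff l).mp (Bool.not_eq_true _ ▸ hany)
      have hdeg : pvDeg l = 0 := by rw [pvDeg, if_neg hany]
      constructor
      · intro _; omega
      · intro _; exact pvDiffIter_zero _ _ hz

def pvRowsOf (l : List Int) : List (List Int) :=
  l :: (if l.any (fun x => x != 0) then pvRowsOf (pvPairwiseDiff l) else [])
termination_by l.length
decreasing_by
  have hne : l ≠ [] := by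
    intro h0; subst h0; simp_all
  have h1 := pvPairwiseDiff_length l
  have h2 : 0 < l.length := List.length_pos_iff.mpr hne
  omega

-- forward-append values of one row, given the lower row's forward values
def pvApF (x : Int) : List Int → List Int
  | [] => []
  | d :: ds => (x + d) :: pvApF (x + d) ds

-- backward-prepend values (nearest-first), given the lower row's backward values
def pvBpF (x : Int) : List Int → List Int
  | [] => []
  | d :: ds => (x - d) :: pvBpF (x - d) ds

def pvAFold : List (List Int) → List Int → List Int
  | [], A => A
  | r :: rest, A => pvAFold rest (pvApF (r.getLastD 0) A)

def pvPFold : List (List Int) → List Int → List Int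
  | [], P => P
  | r :: rest, P => pvPFold rest (pvBpF (r.headD 0) P)

def pvExtList : List (List Int) → List Int → List Int → List (List Int)
  | [], _, _ => []
  | r :: rest, A, P =>
    ((pvBpF (r.headD 0) P).reverse ++ r ++ pvApF (r.getLastD 0) A) ::
      pvExtList rest (pvApF (r.getLastD 0) A) (pvBpF (r.headD 0) P)

def pvGood (low : Option (List Int)) (A P : List Int) (fN bN : Nat) : Prop :=
  A.length = fN ∧ P.length = bN ∧
  ((low = none ∧ A = List.replicate fN 0 ∧ P = List.replicate bN 0) ∨
   (∃ l, low = some l ∧ l ≠ [] ∧ fN ≤ l.length ∧ bN ≤ l.length ∧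
      l.drop (l.length - fN) = A ∧ (l.take bN).reverse = P))

theorem pvApF_length (x : Int) (ds : List Int) : (pvApF x ds).length = ds.length := by
  induction ds generalizing x with
  | nil => simp [pvApF]
  | cons d ds ih => simp [pvApF, ih]

theorem pvBpF_length (x : Int) (ds : List Int) : (pvBpF x ds).length = ds.length := by
  induction ds generalizing x with
  | nil => simp [pvBpF]
  | cons d ds ih => simp [pvBpF, ih]

theorem pvGetLast?_eq_getLastD {l : List Int} (h : l ≠ []) :
    l.getLast? = some (l.getLastD 0) := by
  cases hl : l.getLast? with
  | none => exact absurd (List.getLast?_eq_none_iff.mp hl) h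
  | some a => simp [List.getLastD_eq_getLast?, hl]

theorem pvDiffB_eq (l : List Int) : pvDiffB l = pvPairwiseDiff l := by
  simp [pvDiffB, pvPairwiseDiff, List.drop_one]

-- builders agree
theorem pvBuild_eq (acc : List (List Int)) (cur : List Int) (deg dl : Int) :
    pvBuildB acc cur deg dl = pvBuildA acc cur deg dl := by
  induction acc, cur, deg using pvBuildA.induct (degree_limit := dl) with
  | case1 acc cur deg h hlim =>
    rw [pvBuildB, pvBuildA, if_pos h, if_pos h, if_pos hlim, if_pos hlim]
  | case2 acc cur deg h hlim ih =>
    rw [pvBuildB, pvBuildA, if_pos h, if_pos h, if_neg hlim, if_neg hlim, pvDiffB_eq, ih]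
  | case3 acc cur deg h =>
    rw [pvBuildB, pvBuildA, if_neg h, if_neg h]

-- the builder returns the pure table
theorem pvBuildA_spec (cur : List Int) (pre : List (List Int)) (deg dl : Int)
    (h : pvDeg cur = 0 ∨ deg + (pvDeg cur : Int) ≤ dl) :
    pvBuildA (pre ++ [cur]) cur deg dl = some (pre ++ pvRowsOf cur) := by
  induction cur using pvDeg.induct generalizing pre deg with
  | case1 l hany ih =>
    have hdeg : pvDeg l = pvDeg (pvPairwiseDiff l) + 1 := by rw [pvDeg, if_pos hany]
    have hle : deg + 1 ≤ dl ∧ (pvDeg (pvPairwiseDiff l) = 0 ∨ (deg + 1) + (pvDeg (pvPairwiseDiff l) : Int) ≤ dl) := by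
      rcases h with h | h
      · omega
      · rw [hdeg] at h; push_cast at h ⊢; omega
    rw [pvBuildA, if_pos hany, if_neg (by omega)]
    have hrows : pvRowsOf l = l :: pvRowsOf (pvPairwiseDiff l) := by rw [pvRowsOf, if_pos hany]
    rw [ih (pre ++ [l]) (deg + 1) hle.2, hrows]
    simp
  | case2 l hany =>
    rw [pvBuildA, if_neg (by simp [hany]), pvRowsOf, if_neg (by simp [hany])]

theorem pvRowsOf_forall_ne_nil (l : List Int) (h : pvDeg l < l.length) :
    ∀ r ∈ pvRowsOf l, r ≠ [] := by
  induction l using pvDeg.induct with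
  | case1 l hany ih =>
    have hdeg : pvDeg l = pvDeg (pvPairwiseDiff l) + 1 := by rw [pvDeg, if_pos hany]
    have hlen := pvPairwiseDiff_length l
    rw [pvRowsOf, if_pos hany]
    intro r hr
    rcases List.mem_cons.mp hr with rfl | hr
    · intro h0; subst h0; simp at hany
    · exact ih (by omega) r hr
  | case2 l hany =>
    have h0 : pvDeg l = 0 := by rw [pvDeg, if_neg (by simp [hany])]
    rw [pvRowsOf, if_neg (by simp [hany])]
    intro r hr
    rcases List.mem_cons.mp hr with rfl | hr
    · intro he; subst he; simp at h
    · simp at hr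

-- ranges normalised through toNat
theorem pvRangeF (f : Int) :
    PySem.List.pyRange (-f) 0 1 = PySem.List.pyRange (-(f.toNat : Int)) 0 1 := by
  by_cases hf : 0 ≤ f
  · rw [Int.toNat_of_nonneg hf]
  · rw [PySem.List.pyRange_one_eq_nil (by omega), PySem.List.pyRange_one_eq_nil (by omega)]

theorem pvRangeB (b : Int) :
    PySem.List.pyRange (b - 1) (-1) (-1) = PySem.List.pyRange ((b.toNat : Int) - 1) (-1) (-1) := by
  by_cases hb : 0 ≤ b
  · rw [Int.toNat_of_nonneg hb]
  · rw [PySem.List.pyRange_neg_one_eq_nil (by omega), PySem.List.pyRange_neg_one_eq_nil (by omega)]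

theorem pvFwdA_none (m : Nat) (row : List Int) (h : row ≠ []) :
    pvFwdA (PySem.List.pyRange (-(m : Int)) 0 1) none row =
      some (row ++ pvApF (row.getLastD 0) (List.replicate m 0)) := by
  induction m generalizing row with
  | zero =>
    rw [show (-((0 : Nat) : Int)) = 0 by simp, PySem.List.pyRange_one_eq_nil le_rfl]
    simp [pvFwdA, pvApF]
  | succ m ih =>
    rw [PySem.List.pyRange_one_cons (by push_cast; omega),
        show (-(((m + 1 : Nat)) : Int) + 1) = -((m : Nat) : Int) by push_cast; ring]
    rw [pvFwdA]
    rw [show pvDOf none (-(((m + 1 : Nat)) : Int)) = some 0 from rfl,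
        PySem.List.pyGet?_neg_one, pvGetLast?_eq_getLastD h]
    show pvFwdA (PySem.List.pyRange (-((m : Nat) : Int)) 0 1) none (row ++ [row.getLastD 0 + 0]) = _
    rw [ih (row ++ [row.getLastD 0 + 0]) (by simp)]
    simp [List.replicate_succ, pvApF]

theorem pvFwdA_some (m : Nat) (L row : List Int) (h : row ≠ []) (hL : L ≠ [])
    (hm : m ≤ L.length) :
    pvFwdA (PySem.List.pyRange (-(m : Int)) 0 1) (some L) row =
      some (row ++ pvApF (row.getLastD 0) (L.drop (L.length - m))) := by
  induction m generalizing row with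
  | zero =>
    rw [show (-((0 : Nat) : Int)) = 0 by simp, PySem.List.pyRange_one_eq_nil le_rfl]
    simp [pvFwdA, pvApF]
  | succ m ih =>
    have hidx : L.length - (m + 1) < L.length := by omega
    rw [PySem.List.pyRange_one_cons (by push_cast; omega),
        show (-(((m + 1 : Nat)) : Int) + 1) = -((m : Nat) : Int) by push_cast; ring]
    rw [pvFwdA]
    have hd : pvDOf (some L) (-(((m + 1 : Nat)) : Int)) = some (L[L.length - (m + 1)]) := by
      rw [pvDOf, if_neg (by simp [hL]),
          PySem.List.pyGet?_neg_natCast L (m + 1) (by omega) (by omega),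
          List.getElem?_eq_getElem hidx]
    rw [hd, PySem.List.pyGet?_neg_one, pvGetLast?_eq_getLastD h]
    show pvFwdA (PySem.List.pyRange (-((m : Nat) : Int)) 0 1) (some L)
        (row ++ [row.getLastD 0 + L[L.length - (m + 1)]]) = _
    rw [ih (row ++ [row.getLastD 0 + L[L.length - (m + 1)]]) (by simp) (by omega)]
    rw [List.drop_eq_getElem_cons hidx, show L.length - (m + 1) + 1 = L.length - m by omega]
    simp [pvApF]

theorem pvBwdA_none (m : Nat) (row : List Int) (h : row ≠ []) :
    pvBwdA (PySem.List.pyRange ((m : Int) - 1) (-1) (-1)) none row =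
      some ((pvBpF (row.headD 0) (List.replicate m 0)).reverse ++ row) := by
  induction m generalizing row with
  | zero =>
    rw [show ((0 : Nat) : Int) - 1 = -1 by simp, PySem.List.pyRange_neg_one_eq_nil le_rfl]
    simp [pvBwdA, pvBpF]
  | succ m ih =>
    rw [PySem.List.pyRange_neg_one_cons (by push_cast; omega),
        show ((((m + 1 : Nat)) : Int) - 1 - 1) = ((m : Nat) : Int) - 1 by push_cast; ring]
    rw [pvBwdA]
    have hfst : PySem.List.pyGet? row 0 = some (row.headD 0) := by
      cases row with
      | nil => exact absurd rfl h
      | cons a l => rw [PySem.List.pyGet?_zero_cons]; rfl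
    rw [show pvDOf none ((((m + 1 : Nat)) : Int) - 1) = some 0 from rfl, hfst]
    show pvBwdA (PySem.List.pyRange (((m : Nat) : Int) - 1) (-1) (-1)) none
        ((row.headD 0 - 0) :: row) = _
    rw [ih ((row.headD 0 - 0) :: row) (by simp)]
    simp [List.replicate_succ, pvBpF]

theorem pvBwdA_some (m : Nat) (L row : List Int) (h : row ≠ []) (hL : L ≠ [])
    (hm : m ≤ L.length) :
    pvBwdA (PySem.List.pyRange ((m : Int) - 1) (-1) (-1)) (some L) row =
      some ((pvBpF (row.headD 0) ((L.take m).reverse)).reverse ++ row) := by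
  induction m generalizing row with
  | zero =>
    rw [show ((0 : Nat) : Int) - 1 = -1 by simp, PySem.List.pyRange_neg_one_eq_nil le_rfl]
    simp [pvBwdA, pvBpF]
  | succ m ih =>
    have hidx : m < L.length := by omega
    rw [PySem.List.pyRange_neg_one_cons (by push_cast; omega),
        show ((((m + 1 : Nat)) : Int) - 1 - 1) = ((m : Nat) : Int) - 1 by push_cast; ring]
    rw [pvBwdA]
    have hfst : PySem.List.pyGet? row 0 = some (row.headD 0) := by
      cases row with
      | nil => exact absurd rfl h
      | cons a l => rw [PySem.List.pyGet?_zero_cons]; rfl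
    have hd : pvDOf (some L) ((((m + 1 : Nat)) : Int) - 1) = some (L[m]) := by
      rw [pvDOf, if_neg (by simp [hL]),
          show ((((m + 1 : Nat)) : Int) - 1) = ((m : Nat) : Int) by push_cast; ring,
          PySem.List.pyGet?_natCast, List.getElem?_eq_getElem hidx]
    rw [hd, hfst]
    show pvBwdA (PySem.List.pyRange (((m : Nat) : Int) - 1) (-1) (-1)) (some L)
        ((row.headD 0 - L[m]) :: row) = _
    rw [ih ((row.headD 0 - L[m]) :: row) (by simp) (by omega)]
    have htk : (List.take (m + 1) L).reverse = L[m] :: (List.take m L).reverse := by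
      rw [List.take_add_one, List.getElem?_eq_getElem hidx]
      simp
    rw [htk, pvBpF]
    simp

theorem pvExtRowA_spec (row : List Int) (low : Option (List Int)) (f b : Int) (A P : List Int)
    (h : row ≠ []) (hg : pvGood low A P f.toNat b.toNat) :
    pvExtRowA row low f b =
      some ((pvBpF (row.headD 0) P).reverse ++ row ++ pvApF (row.getLastD 0) A) := by
  unfold pvExtRowA
  rw [pvRangeF, pvRangeB]
  obtain ⟨hA, hP, hcase⟩ := hg
  have hh : ∀ ap : List Int, (row ++ ap).headD 0 = row.headD 0 := by
    intro ap; cases row with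
    | nil => exact absurd rfl h
    | cons a l => rfl
  rcases hcase with ⟨hlow, hAr, hPr⟩ | ⟨l, hlow, hlne, hfl, hbl, hdrop, htake⟩
  · subst hlow
    rw [pvFwdA_none f.toNat row h]
    show pvBwdA (PySem.List.pyRange ((b.toNat : Int) - 1) (-1) (-1)) none
        (row ++ pvApF (row.getLastD 0) (List.replicate f.toNat 0)) = _
    rw [pvBwdA_none b.toNat _ (by simp [h]), hh, hAr, hPr]
    simp [List.append_assoc]
  · subst hlow
    rw [pvFwdA_some f.toNat l row h hlne hfl]
    show pvBwdA (PySem.List.pyRange ((b.toNat : Int) - 1) (-1) (-1)) (some l)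
        (row ++ pvApF (row.getLastD 0) (l.drop (l.length - f.toNat))) = _
    rw [pvBwdA_some b.toNat l _ (by simp [h]) hlne hbl, hh, hdrop, htake]
    simp [List.append_assoc]

theorem pvGood_next (row : List Int) (low : Option (List Int)) (A P : List Int) (fN bN : Nat)
    (h : row ≠ []) (hg : pvGood low A P fN bN) :
    pvGood (some ((pvBpF (row.headD 0) P).reverse ++ row ++ pvApF (row.getLastD 0) A))
      (pvApF (row.getLastD 0) A) (pvBpF (row.headD 0) P) fN bN := by
  obtain ⟨hA, hP, _⟩ := hg
  refine ⟨by rw [pvApF_length, hA], by rw [pvBpF_length, hP], Or.inr ?_⟩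
  refine ⟨_, rfl, by simp [h], ?_, ?_, ?_, ?_⟩
  · simp only [List.length_append, List.length_reverse, pvApF_length, pvBpF_length, hA, hP]
    omega
  · simp only [List.length_append, List.length_reverse, pvApF_length, pvBpF_length, hA, hP]
    omega
  · have hlen : ((pvBpF (row.headD 0) P).reverse ++ row ++ pvApF (row.getLastD 0) A).length - fN
        = ((pvBpF (row.headD 0) P).reverse ++ row).length := by
      simp [pvApF_length, pvBpF_length, hA, hP]
      omega
    rw [hlen, List.drop_left]
  · rw [List.append_assoc, List.take_left' (by simp [pvBpF_length, hP]), List.reverse_reverse]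

theorem pvExtAllA_spec (f b : Int) (L : List (List Int)) (acc : List (List Int))
    (A P : List Int) (hne : ∀ r ∈ L, r ≠ [])
    (hg : pvGood acc.getLast? A P f.toNat b.toNat) :
    pvExtAllA L acc f b = some (acc ++ pvExtList L A P) := by
  induction L generalizing acc A P with
  | nil => simp [pvExtAllA, pvExtList]
  | cons r rest ih =>
    have hr : r ≠ [] := hne r (by simp)
    rw [pvExtAllA, pvExtRowA_spec r acc.getLast? f b A P hr hg]
    show pvExtAllA rest
        (acc ++ [(pvBpF (r.headD 0) P).reverse ++ r ++ pvApF (r.getLastD 0) A]) f b = _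
    rw [ih _ _ _ (fun x hx => hne x (by simp [hx]))
        (by rw [List.getLast?_concat]; exact pvGood_next r acc.getLast? A P f.toNat b.toNat hr hg)]
    simp [pvExtList]

theorem pvExtList_ne_nil (r : List Int) (rest : List (List Int)) (A P : List Int) :
    pvExtList (r :: rest) A P ≠ [] := by
  simp [pvExtList]

theorem pvExtList_last (Lpre : List (List Int)) (x : List Int) (A P : List Int) :
    (pvExtList (Lpre ++ [x]) A P).getLast? =
      some ((pvBpF (x.headD 0) (pvPFold Lpre P)).reverse ++ x ++
            pvApF (x.getLastD 0) (pvAFold Lpre A)) := by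
  induction Lpre generalizing A P with
  | nil => simp [pvExtList, pvAFold, pvPFold]
  | cons a L ih =>
    have hch : pvExtList ((a :: L) ++ [x]) A P =
        ((pvBpF (a.headD 0) P).reverse ++ a ++ pvApF (a.getLastD 0) A) ::
          pvExtList (L ++ [x]) (pvApF (a.getLastD 0) A) (pvBpF (a.headD 0) P) := rfl
    rw [hch]
    have hne : pvExtList (L ++ [x]) (pvApF (a.getLastD 0) A) (pvBpF (a.headD 0) P) ≠ [] := by
      cases L with
      | nil => simp [pvExtList]
      | cons c cs => exact pvExtList_ne_nil _ _ _ _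
    cases hE : pvExtList (L ++ [x]) (pvApF (a.getLastD 0) A) (pvBpF (a.headD 0) P) with
    | nil => exact absurd hE hne
    | cons z zs =>
      rw [List.getLast?_cons_cons, ← hE, ih]
      rfl

theorem pvAFold_append (xs : List (List Int)) (r : List Int) (A : List Int) :
    pvAFold (xs ++ [r]) A = pvApF (r.getLastD 0) (pvAFold xs A) := by
  induction xs generalizing A with
  | nil => rfl
  | cons a l ih => exact ih _

theorem pvPFold_append (xs : List (List Int)) (r : List Int) (P : List Int) :
    pvPFold (xs ++ [r]) P = pvBpF (r.headD 0) (pvPFold xs P) := by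
  induction xs generalizing P with
  | nil => rfl
  | cons a l ih => exact ih _

theorem pvRunF_nil (n : Nat) : pvRunF n [] = List.replicate n 0 := by
  induction n with
  | zero => rfl
  | succ n ih => simp [pvRunF, pvStepF, ih, List.replicate_succ]

theorem pvRunB_nil (n : Nat) : pvRunB n [] = List.replicate n 0 := by
  induction n with
  | zero => rfl
  | succ n ih => simp [pvRunB, pvStepB, ih, List.replicate_succ]

theorem pvRunF_cons (n : Nat) (x : Int) (ds : List Int) :
    pvRunF n (x :: ds) = pvApF x (pvRunF n ds) := by
  induction n generalizing x ds with
  | zero => rfl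
  | succ n ih =>
    show (pvStepF (x :: ds)).headD 0 :: pvRunF n (pvStepF (x :: ds)) =
      pvApF x ((pvStepF ds).headD 0 :: pvRunF n (pvStepF ds))
    have hst : pvStepF (x :: ds) = (x + (pvStepF ds).headD 0) :: pvStepF ds := rfl
    rw [hst, ih, pvApF]
    rfl

theorem pvRunB_cons (n : Nat) (x : Int) (ds : List Int) :
    pvRunB n (x :: ds) = pvBpF x (pvRunB n ds) := by
  induction n generalizing x ds with
  | zero => rfl
  | succ n ih =>
    show (pvStepB (x :: ds)).headD 0 :: pvRunB n (pvStepB (x :: ds)) =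
      pvBpF x ((pvStepB ds).headD 0 :: pvRunB n (pvStepB ds))
    have hst : pvStepB (x :: ds) = (x - (pvStepB ds).headD 0) :: pvStepB ds := rfl
    rw [hst, ih, pvBpF]
    rfl

theorem pvAFold_reverse (n : Nat) (M : List (List Int)) :
    pvAFold M.reverse (List.replicate n 0) = pvRunF n (M.map (fun r => r.getLastD 0)) := by
  induction M with
  | nil => simp [pvAFold, pvRunF_nil]
  | cons r rest ih =>
    rw [List.reverse_cons, pvAFold_append, ih, List.map_cons, pvRunF_cons]

theorem pvPFold_reverse (n : Nat) (M : List (List Int)) :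
    pvPFold M.reverse (List.replicate n 0) = pvRunB n (M.map (fun r => r.headD 0)) := by
  induction M with
  | nil => simp [pvPFold, pvRunB_nil]
  | cons r rest ih =>
    rw [List.reverse_cons, pvPFold_append, ih, List.map_cons, pvRunB_cons]

theorem pvMapM_last (T : List (List Int)) (h : ∀ r ∈ T, r ≠ []) :
    T.mapM (fun r => PySem.List.pyGet? r (-1)) = some (T.map (fun r => r.getLastD 0)) := by
  induction T with
  | nil => rfl
  | cons r rest ih =>
    have hr : PySem.List.pyGet? r (-1) = some (r.getLastD 0) := by
      rw [PySem.List.pyGet?_neg_one, pvGetLast?_eq_getLastD (h r (by simp))]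
    simp [List.mapM_cons, hr, ih fun x hx => h x (by simp [hx])]

theorem pvMapM_first (T : List (List Int)) (h : ∀ r ∈ T, r ≠ []) :
    T.mapM (fun r => PySem.List.pyGet? r 0) = some (T.map (fun r => r.headD 0)) := by
  induction T with
  | nil => rfl
  | cons r rest ih =>
    have hr : PySem.List.pyGet? r 0 = some (r.headD 0) := by
      cases r with
      | nil => exact absurd rfl (h [] (by simp))
      | cons a l => rw [PySem.List.pyGet?_zero_cons]; rfl
    simp [List.mapM_cons, hr, ih fun x hx => h x (by simp [hx])]

theorem pvExtRowA_trivial (row : List Int) (low : Option (List Int)) (f b : Int)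
    (hf : f ≤ 0) (hb : b ≤ 0) : pvExtRowA row low f b = some row := by
  unfold pvExtRowA
  rw [PySem.List.pyRange_one_eq_nil (by omega), PySem.List.pyRange_neg_one_eq_nil (by omega)]
  rfl

theorem pvExtAllA_id (f b : Int) (hf : f ≤ 0) (hb : b ≤ 0) (L acc : List (List Int)) :
    pvExtAllA L acc f b = some (acc ++ L) := by
  induction L generalizing acc with
  | nil => simp [pvExtAllA]
  | cons r rest ih =>
    rw [pvExtAllA, pvExtRowA_trivial r _ f b hf hb]
    show pvExtAllA rest (acc ++ [r]) f b = _
    rw [ih]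
    simp

-- ===== VERDICT (by name: the statement is the Claim_ definition above) =====
theorem extend_polynomial_sequence_spec : Claim_equal_extend_polynomial_sequence := by
  intro seq f b dl _ hPre
  obtain ⟨hex, hsnd⟩ := hPre
  have h1 : pvDeg seq = 0 ∨ (pvDeg seq : Int) ≤ dl := by
    obtain ⟨k, hk, hor, hz⟩ := hex
    have hdk := (pvDeg_le_iff k seq).mp hz
    rcases hor with rfl | hle
    · left; omega
    · right
      have : (pvDeg seq : Int) ≤ (k : Int) := by exact_mod_cast hdk
      omega
  have h2 : pvDeg seq < seq.length ∨ (f ≤ 0 ∧ b ≤ 0) := by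
    rcases hsnd with ⟨hne, hz⟩ | hfb
    · left
      have hd := (pvDeg_le_iff (seq.length - 1) seq).mp hz
      have hpos : 0 < seq.length := List.length_pos_iff.mpr hne
      omega
    · right; exact hfb
  unfold Spec_extend_polynomial_sequence
  have hbuild : pvBuildA [seq] seq 0 dl = some (pvRowsOf seq) := by
    have := pvBuildA_spec seq [] 0 dl
      (by rcases h1 with h1 | h1
          · exact Or.inl h1
          · right; omega)
    simpa using this
  have hbuildB : pvBuildB [seq] seq 0 dl = some (pvRowsOf seq) := by
    rw [pvBuild_eq]; exact hbuild
  by_cases hlen : pvDeg seq < seq.length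
  · -- all rows nonempty: the diagonal correspondence
    obtain ⟨rest, hT⟩ : ∃ rest, pvRowsOf seq = seq :: rest := ⟨_, by rw [pvRowsOf]⟩
    have hnn : ∀ r ∈ pvRowsOf seq, r ≠ [] := pvRowsOf_forall_ne_nil seq hlen
    have hnnrev : ∀ r ∈ (pvRowsOf seq).reverse, r ≠ [] := by
      intro r hr; exact hnn r (List.mem_reverse.mp hr)
    have hgood0 : pvGood (([] : List (List Int)).getLast?) (List.replicate f.toNat 0)
        (List.replicate b.toNat 0) f.toNat b.toNat := ⟨by simp, by simp, Or.inl ⟨rfl, rfl, rfl⟩⟩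
    have hext := pvExtAllA_spec f b (pvRowsOf seq).reverse [] (List.replicate f.toNat 0)
      (List.replicate b.toNat 0) hnnrev hgood0
    have hA : extend_polynomial_sequence seq f b dl =
        (PySem.List.pyGet? (pvExtList (pvRowsOf seq).reverse (List.replicate f.toNat 0)
          (List.replicate b.toNat 0)) (-1)).getD [] := by
      unfold extend_polynomial_sequence
      rw [hbuild]
      show (match pvExtAllA (pvRowsOf seq).reverse [] f b with
            | none => none
            | some nd => PySem.List.pyGet? nd (-1)).getD [] = _
      rw [hext]
      show (PySem.List.pyGet? ([] ++ pvExtList (pvRowsOf seq).reverse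
          (List.replicate f.toNat 0) (List.replicate b.toNat 0)) (-1)).getD [] = _
      rw [List.nil_append]
    have hback : (if f > 0 then
          ((pvRowsOf seq).mapM (fun r => PySem.List.pyGet? r (-1))).map
            (fun lasts => pvRunF f.toNat lasts)
        else some []) =
        some (pvRunF f.toNat ((pvRowsOf seq).map (fun r => r.getLastD 0))) := by
      by_cases hf : f > 0
      · rw [if_pos hf, pvMapM_last _ hnn]; rfl
      · rw [if_neg hf, show f.toNat = 0 by omega]; rfl
    have hfront : (if b > 0 then
          ((pvRowsOf seq).mapM (fun r => PySem.List.pyGet? r 0)).map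
            (fun firsts => (pvRunB b.toNat firsts).reverse)
        else some []) =
        some ((pvRunB b.toNat ((pvRowsOf seq).map (fun r => r.headD 0))).reverse) := by
      by_cases hb : b > 0
      · rw [if_pos hb, pvMapM_first _ hnn]; rfl
      · rw [if_neg hb, show b.toNat = 0 by omega]; rfl
    have hB : extend_polynomial_sequence_alt seq f b dl =
        (pvRunB b.toNat ((pvRowsOf seq).map (fun r => r.headD 0))).reverse ++ seq ++
          pvRunF f.toNat ((pvRowsOf seq).map (fun r => r.getLastD 0)) := by
      unfold extend_polynomial_sequence_alt
      rw [hbuildB]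
      show (match (if b > 0 then
              ((pvRowsOf seq).mapM (fun r => PySem.List.pyGet? r 0)).map
                (fun firsts => (pvRunB b.toNat firsts).reverse)
            else some []) with
            | none => none
            | some front =>
              match (if f > 0 then
                  ((pvRowsOf seq).mapM (fun r => PySem.List.pyGet? r (-1))).map
                    (fun lasts => pvRunF f.toNat lasts)
                else some []) with
              | none => none
              | some back => some (front ++ seq ++ back)).getD [] = _
      rw [hfront, hback]
      rfl
    rw [hA, hB]
    have hrev : (pvRowsOf seq).reverse = rest.reverse ++ [seq] := by
      rw [hT, List.reverse_cons]
    rw [hrev, PySem.List.pyGet?_neg_one, pvExtList_last]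
    rw [pvPFold_reverse, pvAFold_reverse]
    rw [hT, List.map_cons, List.map_cons, ← pvRunB_cons, ← pvRunF_cons]
    rfl
  · -- no extension requested: both return seq unchanged
    obtain ⟨hf, hb⟩ := h2.resolve_left hlen
    have hid := pvExtAllA_id f b hf hb (pvRowsOf seq).reverse []
    have hA : extend_polynomial_sequence seq f b dl = seq := by
      unfold extend_polynomial_sequence
      rw [hbuild]
      show (match pvExtAllA (pvRowsOf seq).reverse [] f b with
            | none => none
            | some nd => PySem.List.pyGet? nd (-1)).getD [] = _
      rw [hid]
      show (PySem.List.pyGet? ([] ++ (pvRowsOf seq).reverse) (-1)).getD [] = _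
      rw [List.nil_append, PySem.List.pyGet?_neg_one, List.getLast?_reverse,
        show (pvRowsOf seq).head? = some seq by rw [pvRowsOf]; rfl]
      rfl
    have hB : extend_polynomial_sequence_alt seq f b dl = seq := by
      unfold extend_polynomial_sequence_alt
      rw [hbuildB]
      show (match (if b > 0 then
              ((pvRowsOf seq).mapM (fun r => PySem.List.pyGet? r 0)).map
                (fun firsts => (pvRunB b.toNat firsts).reverse)
            else some []) with
            | none => none
            | some front =>
              match (if f > 0 then
                  ((pvRowsOf seq).mapM (fun r => PySem.List.pyGet? r (-1))).map
                    (fun lasts => pvRunF f.toNat lasts)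
                else some []) with
              | none => none
              | some back => some (front ++ seq ++ back)).getD [] = _
      rw [if_neg (by omega), if_neg (by omega)]
      show (some (([] : List Int) ++ seq ++ [])).getD [] = _
      simp
    rw [hA, hB]
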